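-- pv_equiv track=rewrite | github.com/stevenxngo/lineup-decoder | scripts/decryption.py | match_artist
-- ===== SOURCE A (Python) =====
-- def match_pattern(pattern, artist, mappings):
--     # check if pattern and name have the same length
--     if len(pattern) != len(artist):
--         return False
--
--     # check if pattern and name match
--     for p_char, n_char in zip(pattern, artist):
--         if p_char == "-":
--             if n_char in mappings.values() or n_char == " ":
--                 return False
--         elif p_char == " " and n_char != " ":
--             return False
--         else:
--             if p_char != n_char:
--                 return False
--     return True
--
-- def match_artist(pattern, mappings, artists):
--     # check if pattern is a DJ SET
--     if "(DJ SET)" in pattern: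
--         matches = [
--             artist + " (DJ SET)"
--             for artist in artists
--             if match_pattern(pattern, artist + " (DJ SET)", mappings)
--         ]
--
--     # not a DJ SET
--     else:
--         matches = [
--             artist
--             for artist in artists
--             if match_pattern(pattern, artist, mappings)
--         ]
--     return ", ".join(matches) if matches else None
-- ===== SOURCE B (Python) =====
-- def match_artist(pattern, mappings, artists):
--     # Column-wise sieve: consume the pattern one character at a time, narrowing one
--     # shared pool of (candidate, unmatched tail) pairs, instead of testing each
--     # candidate independently with a per-candidate character loop.
--     suffix = " (DJ SET)" if "(DJ SET)" in pattern else ""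
--     forbidden = {" "} | set(mappings.values())
--     pool = [(a + suffix, a + suffix) for a in artists
--             if len(a) + len(suffix) == len(pattern)]
--     for p in pattern:
--         if p == "-":
--             pool = [(s, t[1:]) for s, t in pool if t[0] not in forbidden]
--         else:
--             pool = [(s, t[1:]) for s, t in pool if t[0] == p]
--     return ", ".join(s for s, _ in pool) if pool else None
-- ===== Notes on version B (the rewrite author's own statement) =====
-- stated objective: alternative
-- what changed: B inverts the loop nesting: instead of A's per-candidate helper that scans the whole pattern for each artist, B walks the pattern once and at each character sieves a single shared pool of (candidate, unmatched-tail) pairs, peeling one character off every surviving tail; the forbidden set for '-' is built once per call.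
import Mathlib
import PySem

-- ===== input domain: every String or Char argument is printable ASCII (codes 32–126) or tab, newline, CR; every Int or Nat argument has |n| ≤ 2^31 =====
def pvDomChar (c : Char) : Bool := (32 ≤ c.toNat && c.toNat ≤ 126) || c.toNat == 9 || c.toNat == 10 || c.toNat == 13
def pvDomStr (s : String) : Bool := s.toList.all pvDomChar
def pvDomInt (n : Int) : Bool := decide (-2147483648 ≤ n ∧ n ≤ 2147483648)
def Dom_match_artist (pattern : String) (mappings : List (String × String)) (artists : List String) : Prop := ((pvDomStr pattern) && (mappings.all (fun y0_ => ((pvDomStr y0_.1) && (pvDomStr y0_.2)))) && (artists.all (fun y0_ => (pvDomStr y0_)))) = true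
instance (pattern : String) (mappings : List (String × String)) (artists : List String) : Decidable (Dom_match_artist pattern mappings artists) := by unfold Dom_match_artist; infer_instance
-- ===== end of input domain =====

-- B inverts the loop nesting: it walks the pattern once and sieves one shared pool of
-- (candidate, unmatched-tail) pairs per pattern character, instead of A's per-candidate
-- helper that rescans the pattern (and mappings.values()) for every artist (objective: alternative).


-- ===== PORT A =====
-- the early-return loop `for p_char, n_char in zip(pattern, artist): …` of match_pattern
def matchPatternGo (vals : List String) : List (Char × Char) → Bool
  | [] => true
  | (p, n) :: rest =>
    if p == '-' then
      if vals.contains (String.ofList [n]) || n == ' ' then false else matchPatternGo vals rest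
    else if p == ' ' && n != ' ' then false
    else if p != n then false
    else matchPatternGo vals rest

-- match_pattern(pattern, artist, mappings); `mappings.values()` is the value list in insertion order
def matchPattern (pattern artist : String) (mappings : List (String × String)) : Bool :=
  if PySem.Str.len pattern ≠ PySem.Str.len artist then false
  else matchPatternGo (PySem.Dict.mk mappings).values (pattern.toList.zip artist.toList)

def match_artist (pattern : String) (mappings : List (String × String)) (artists : List String) : Option String :=
  let ms :=
    if PySem.Str.isIn "(DJ SET)" pattern then
      (artists.filter (fun a => matchPattern pattern (a ++ " (DJ SET)") mappings)).map
        (fun a => a ++ " (DJ SET)")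
    else
      artists.filter (fun a => matchPattern pattern a mappings)
  if ms.isEmpty then none else some (PySem.Str.join ", " ms)

-- ===== PORT B =====
-- one sieve step of Source B's `for p in pattern:` loop; the unmatched string tail is carried
-- as its List Char (exact: the tail is consumed one character at a time, t[0]/t[1:] are
-- head/tail; an empty tail — unreachable, Python would raise — yields none)
def sieveStep (forbidden : PySem.Set String) (pool : List (String × List Char)) (p : Char) :
    List (String × List Char) :=
  if p == '-' then
    pool.filterMap (fun st =>
      match st.2 with
      | [] => none
      | c :: r => if !(PySem.Set.contains forbidden (String.ofList [c])) then some (st.1, r) else none)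
  else
    pool.filterMap (fun st =>
      match st.2 with
      | [] => none
      | c :: r => if c == p then some (st.1, r) else none)

def match_artist_alt (pattern : String) (mappings : List (String × String)) (artists : List String) : Option String :=
  let suffix := if PySem.Str.isIn "(DJ SET)" pattern then " (DJ SET)" else ""
  let forbidden : PySem.Set String :=
    PySem.Set.union (PySem.Set.ofList [" "]) ((PySem.Dict.mk mappings).values)
  let pool0 :=
    (artists.filter (fun a => PySem.Str.len a + PySem.Str.len suffix == PySem.Str.len pattern)).map
      (fun a => (a ++ suffix, (a ++ suffix).toList))
  let pool := pattern.toList.foldl (sieveStep forbidden) pool0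
  if pool.isEmpty then none else some (PySem.Str.join ", " (pool.map (·.1)))

-- ===== PRECONDITION & SPEC =====
def Spec_match_artist (pattern : String) (mappings : List (String × String)) (artists : List String) (out : Option String) : Prop := out = match_artist_alt pattern mappings artists
instance (pattern : String) (mappings : List (String × String)) (artists : List String) (out : Option String) : Decidable (Spec_match_artist pattern mappings artists out) := by unfold Spec_match_artist; infer_instance

-- ===== CLAIM (what is proved, stated in full; the proofs are below) =====
def Claim_equal_match_artist : Prop := ∀ (pattern : String) (mappings : List (String × String)) (artists : List String), Dom_match_artist pattern mappings artists → Spec_match_artist pattern mappings artists (match_artist pattern mappings artists)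

-- ===== LEMMAS AND PROOFS =====

-- the per-character test both programs apply
def sieveTest (vals : List String) (p c : Char) : Bool :=
  if p == '-' then !(vals.contains (String.ofList [c]) || c == ' ') else c == p

lemma forbidden_contains (vals : List String) (n : Char) :
    PySem.Set.contains (PySem.Set.union (PySem.Set.ofList [" "]) vals) (String.ofList [n])
      = (vals.contains (String.ofList [n]) || n == ' ') := by
  rw [Bool.eq_iff_iff]
  simp only [PySem.Set.contains_iff, PySem.Set.mem_union, PySem.Set.mem_ofList,
    List.mem_singleton, Bool.or_eq_true, List.contains_iff_mem, beq_iff_eq]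
  constructor
  · rintro (h | h)
    · right
      have := congrArg String.toList h
      simpa using this
    · left; exact h
  · rintro (h | h)
    · right; exact h
    · left
      apply String.toList_injective ?_
      simp [h]

lemma sieveStep_eq (vals : List String) (pool : List (String × List Char)) (p : Char) :
    sieveStep (PySem.Set.union (PySem.Set.ofList [" "]) vals) pool p
      = pool.filterMap (fun st =>
          match st.2 with
          | [] => none
          | c :: r => if sieveTest vals p c then some (st.1, r) else none) := by
  by_cases h : p = '-'
  · simp only [sieveStep, sieveTest, h, if_true, beq_self_eq_true, forbidden_contains]
  · simp only [sieveStep, sieveTest, forbidden_contains]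
    simp [h]

lemma sieve_fold (vals : List String) (ps : List Char) (pool : List (String × List Char)) :
    ps.foldl (sieveStep (PySem.Set.union (PySem.Set.ofList [" "]) vals)) pool
      = pool.filterMap (fun st =>
          if (decide (ps.length ≤ st.2.length)) &&
             (ps.zip st.2).all (fun pc => sieveTest vals pc.1 pc.2)
          then some (st.1, st.2.drop ps.length) else none) := by
  induction ps generalizing pool with
  | nil => simp
  | cons p ps ih =>
    rw [List.foldl_cons, ih, sieveStep_eq, List.filterMap_filterMap]
    apply List.filterMap_congr
    intro st _
    obtain ⟨s, t⟩ := st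
    cases t with
    | nil => simp
    | cons c r =>
      by_cases h : sieveTest vals p c = true
      · simp [h]
      · simp [h]

lemma go_eq_all (vals : List String) (z : List (Char × Char)) :
    matchPatternGo vals z = z.all (fun pn => sieveTest vals pn.1 pn.2) := by
  induction z with
  | nil => rfl
  | cons pn rest ih =>
    obtain ⟨p, n⟩ := pn
    simp only [matchPatternGo, List.all_cons, ih, sieveTest]
    by_cases hp : p = '-'
    · subst hp
      cases hc : vals.contains (String.ofList [n]) <;> by_cases hn : n = ' ' <;> simp [hn]
    · by_cases hsp : p = ' '
      · subst hsp
        by_cases hn : n = ' ' <;> simp [hn]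
      · by_cases hpn : p = n
        · subst hpn; simp [hp, hsp]
        · simp [hp, hpn, Ne.symm hpn]

lemma matchPattern_eq (pattern s : String) (mappings : List (String × String)) :
    matchPattern pattern s mappings
      = ((PySem.Str.len s == PySem.Str.len pattern) &&
          ((pattern.toList.zip s.toList).all (fun pn =>
            sieveTest (PySem.Dict.mk mappings).values pn.1 pn.2))) := by
  unfold matchPattern
  by_cases h : PySem.Str.len pattern = PySem.Str.len s
  · rw [if_neg (not_not_intro h), go_eq_all,
      show (PySem.Str.len s == PySem.Str.len pattern) = true from by
        simp only [beq_iff_eq]; exact h.symm, Bool.true_and]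
  · rw [if_pos h,
      show (PySem.Str.len s == PySem.Str.len pattern) = false from by
        simp only [beq_eq_false_iff_ne]; exact Ne.symm h,
      Bool.false_and]

-- turning `if p then some (f a) else none` filterMaps into filter+map
lemma filterMap_if_some {α β : Type} (l : List α) (p : α → Bool) (f : α → β) :
    l.filterMap (fun a => if p a then some (f a) else none) = (l.filter p).map f := by
  rw [← List.filterMap_eq_map, List.filterMap_filter]; rfl

-- B's sieved pool, projected to the candidate strings, is A's filtered list
lemma main_list (pattern suffix : String) (mappings : List (String × String)) (artists : List String) :
    ((pattern.toList.foldl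
        (sieveStep (PySem.Set.union (PySem.Set.ofList [" "]) ((PySem.Dict.mk mappings).values)))
        ((artists.filter (fun a => PySem.Str.len a + PySem.Str.len suffix == PySem.Str.len pattern)).map
          (fun a => (a ++ suffix, (a ++ suffix).toList)))).map (·.1))
      = (artists.filter (fun a => matchPattern pattern (a ++ suffix) mappings)).map
          (fun a => a ++ suffix) := by
  rw [sieve_fold, List.filterMap_map, List.map_filterMap]
  have hmid :
      (artists.filter (fun a => PySem.Str.len a + PySem.Str.len suffix == PySem.Str.len pattern)).filterMap
          (fun a =>
            ((fun st : String × List Char =>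
              if (decide (pattern.toList.length ≤ st.2.length)) &&
                  ((pattern.toList.zip st.2).all
                    (fun pc => sieveTest (PySem.Dict.mk mappings).values pc.1 pc.2))
              then some (st.1, st.2.drop pattern.toList.length) else none)
              ((fun a => (a ++ suffix, (a ++ suffix).toList)) a)).map (·.1))
        = (artists.filter (fun a => PySem.Str.len a + PySem.Str.len suffix == PySem.Str.len pattern)).filterMap
          (fun a =>
            if (pattern.toList.zip (a ++ suffix).toList).all
                (fun pc => sieveTest (PySem.Dict.mk mappings).values pc.1 pc.2)
            then some (a ++ suffix) else none) := by
    apply List.filterMap_congr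
    intro a ha
    have hm := (List.mem_filter.mp ha).2
    have hlen : (a ++ suffix).toList.length = pattern.toList.length := by
      simp only [beq_iff_eq, PySem.Str.len_eq] at hm
      simp only [String.toList_append, List.length_append]
      omega
    simp only [hlen, le_refl, decide_true, Bool.true_and]
    split <;> simp
  simp only [Function.comp_def]
  rw [hmid, filterMap_if_some, List.filter_filter]
  apply congrArg
  apply List.filter_congr
  intro a _
  rw [matchPattern_eq, PySem.Str.len_append, Bool.and_comm]

-- ===== VERDICT (by name: the statement is the Claim_ definition above) =====
theorem match_artist_spec : Claim_equal_match_artist := by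
  intro pattern mappings artists _
  unfold Spec_match_artist match_artist match_artist_alt
  by_cases hdj : PySem.Str.isIn "(DJ SET)" pattern = true
  · simp only [hdj, if_true]
    rw [← main_list pattern " (DJ SET)" mappings artists]
    simp [List.isEmpty_map]
  · simp only [hdj, if_false, Bool.false_eq_true]
    have e1 : artists.filter (fun a => matchPattern pattern a mappings)
        = (artists.filter (fun a => matchPattern pattern (a ++ "") mappings)).map
            (fun a => a ++ "") := by
      simp
    rw [e1, ← main_list pattern "" mappings artists]
    simp [List.isEmpty_map]
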